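-- pv_equiv track=rewrite | github.com/SteevenJanny/InformatiquePourTous-CPGE | 1er_SEMESTRE/Algorithmes_gloutons/exercice1.py | organisePassageRecursif
-- ===== SOURCE A (Python) =====
-- def dernierCreneauAvant(T, creneaux):
--     """ Q3 : Coder une fonction dernierCreneauAvant(T, creneaux) qui renvoie l'indice du créneau de la liste creneaux
--     qui finit le plus tard sans dépasser T. Elle renverra None si aucun créneau ne convient."""
--     indice_max = None  # Initialisation des variables
--     maximum = 0
--     for indice, c in enumerate(creneaux):  # Début de la recherche séquentielle
--         if maximum < c and c + 3600 <= T:  # Cherche max qui ne dépasse pas T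
--             maximum = c
--             indice_max = indice
--     return indice_max
--
-- def organisePassageRecursif(creneaux, T=0):
--     """ Q5 : Coder la même fonction en récursif."""
--     if T == 0:  # paramètre par défaut = on lance la fonction pour la première fois
--         T = max(creneaux) + 3600
--     prochain = dernierCreneauAvant(T, creneaux)
--     if prochain is None:  # Condition d'arrêt : on ne trouve plus de créneau
--         return []
--     T = creneaux[prochain]
--     return [creneaux[prochain]] + organisePassageRecursif(creneaux, T)
-- ===== SOURCE B (Python) =====
-- def organisePassageRecursif(creneaux, T=0):
--     """Sort once in descending order, then greedily pick each positive value
--     that fits at least 3600 below the previous pick (or below T)."""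
--     limit = max(creneaux) + 3600 if T == 0 else T
--     result = []
--     for c in sorted(creneaux, reverse=True):
--         if 0 < c and c + 3600 <= limit:
--             result.append(c)
--             limit = c
--     return result
-- ===== Notes on version B (the rewrite author's own statement) =====
-- stated objective: faster
-- what changed: A rescans the whole list with a linear maximum search before every pick (quadratic recursion); B sorts the list descending once and makes a single greedy pass keeping only the last picked value.
-- outside the precondition, e.g. on organisePassageRecursif([], 0): A raises ValueError, B raises ValueError
import Mathlib
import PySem

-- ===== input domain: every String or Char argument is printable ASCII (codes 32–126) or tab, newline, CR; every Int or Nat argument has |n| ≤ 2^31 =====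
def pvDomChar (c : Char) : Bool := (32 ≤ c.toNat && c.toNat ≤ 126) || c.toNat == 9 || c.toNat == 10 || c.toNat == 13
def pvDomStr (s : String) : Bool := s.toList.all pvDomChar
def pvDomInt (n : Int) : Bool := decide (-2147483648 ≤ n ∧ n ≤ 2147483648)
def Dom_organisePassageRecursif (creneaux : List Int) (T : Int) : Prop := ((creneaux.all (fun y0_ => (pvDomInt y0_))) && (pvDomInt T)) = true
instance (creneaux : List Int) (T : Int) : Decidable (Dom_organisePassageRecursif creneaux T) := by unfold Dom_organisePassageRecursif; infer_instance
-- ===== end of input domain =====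

-- B sorts once (descending) and does a single greedy pass instead of A's repeated
-- linear maximum searches: O(n log n) instead of O(n^2). Equivalence proved on all
-- inputs except the empty list with T = 0, where the Python A raises ValueError.


-- ===== PORT A =====

-- the loop body of dernierCreneauAvant: state = (indice_max, maximum)
def dcaStep (T : Int) (st : Option Int × Int) (p : Int × Int) : Option Int × Int :=
  if st.2 < p.2 ∧ p.2 + 3600 ≤ T then (some p.1, p.2) else st

-- Q3 helper: index of the largest positive value c with c + 3600 <= T (None if no such c)
def dernierCreneauAvant (T : Int) (creneaux : List Int) : Option Int :=
  ((PySem.List.enumerate creneaux 0).foldl (dcaStep T) (none, 0)).1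

-- invariant of the fold state (used below for termination of the recursive port)
def dcaInv (T : Int) (creneaux : List Int) (st : Option Int × Int) : Prop :=
  0 ≤ st.2 ∧ ∀ i, st.1 = some i →
    PySem.List.pyGet? creneaux i = some st.2 ∧ 0 < st.2 ∧ st.2 + 3600 ≤ T ∧ st.2 ∈ creneaux

theorem dcaInv_foldl (T : Int) (creneaux : List Int) :
    ∀ (l : List (Int × Int)) (st : Option Int × Int),
      (∀ p ∈ l, PySem.List.pyGet? creneaux p.1 = some p.2 ∧ p.2 ∈ creneaux) →
      dcaInv T creneaux st → dcaInv T creneaux (l.foldl (dcaStep T) st) := by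
  intro l
  induction l with
  | nil => intro st _ h; simpa using h
  | cons p t ih =>
    intro st hl hst
    simp only [List.foldl_cons]
    apply ih _ (fun q hq => hl q (List.mem_cons_of_mem _ hq))
    unfold dcaStep
    split_ifs with hc
    · refine ⟨le_of_lt (lt_of_le_of_lt hst.1 hc.1), ?_⟩
      intro i hi
      obtain ⟨h1, h2⟩ := hl p (List.mem_cons_self)
      cases hi
      exact ⟨h1, lt_of_le_of_lt hst.1 hc.1, hc.2, h2⟩
    · exact hst

theorem dca_some_facts (T : Int) (creneaux : List Int) (i : Int)
    (h : dernierCreneauAvant T creneaux = some i) :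
    ∃ v, PySem.List.pyGet? creneaux i = some v ∧ 0 < v ∧ v + 3600 ≤ T ∧ v ∈ creneaux := by
  have hinv : dcaInv T creneaux ((PySem.List.enumerate creneaux 0).foldl (dcaStep T) (none, 0)) := by
    apply dcaInv_foldl
    · intro p hp
      rw [PySem.List.mem_enumerate_iff] at hp
      obtain ⟨k, hk, rfl⟩ := hp
      constructor
      · simp [PySem.List.pyGet?_natCast, List.getElem?_eq_getElem hk]
      · exact List.getElem_mem hk
    · constructor
      · simp
      · intro i hi; simp at hi
  unfold dernierCreneauAvant at h
  obtain ⟨h1, h2, h3, h4⟩ := hinv.2 i h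
  exact ⟨_, h1, h2, h3, h4⟩

theorem filter_length_le {α : Type} {p q : α → Bool} (hpq : ∀ c, p c = true → q c = true) :
    ∀ (l : List α), (l.filter p).length ≤ (l.filter q).length := by
  intro l
  induction l with
  | nil => simp
  | cons a t ih =>
    simp only [List.filter_cons]
    by_cases hp : p a = true
    · rw [if_pos hp, if_pos (hpq a hp)]
      simpa using ih
    · rw [if_neg (by simp [hp])]
      split
      · simpa using Nat.le_succ_of_le ih
      · exact ih

theorem filter_length_lt {α : Type} {p q : α → Bool} (hpq : ∀ c, p c = true → q c = true)
    (l : List α) (v : α) (hv : v ∈ l) (hq : q v = true) (hp : p v = false) :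
    (l.filter p).length < (l.filter q).length := by
  induction l with
  | nil => simp at hv
  | cons a t ih =>
    rcases List.mem_cons.mp hv with rfl | hvt
    · rw [List.filter_cons, List.filter_cons, if_neg (by simp [hp]), if_pos hq]
      simp only [List.length_cons]
      exact Nat.lt_succ_of_le (filter_length_le hpq t)
    · by_cases hpa : p a = true
      · rw [List.filter_cons, List.filter_cons, if_pos hpa, if_pos (hpq a hpa)]
        simp only [List.length_cons]
        exact Nat.succ_lt_succ (ih hvt)
      · rw [List.filter_cons, if_neg (by simp [hpa])]
        refine lt_of_lt_of_le (ih hvt) ?_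
        rw [List.filter_cons]
        split
        · simpa using Nat.le_succ _
        · exact le_refl _

-- the termination measure: number of values still eligible for selection
def dcaMeasure (creneaux : List Int) (T : Int) : Nat :=
  (creneaux.filter (fun c => decide (0 < c) && (decide (c + 3600 ≤ T) || decide (T = 0)))).length

theorem dcaMeasure_lt (creneaux : List Int) (T v : Int) (hv : v ∈ creneaux) (h0 : 0 < v)
    (hle : v + 3600 ≤ T ∨ T = 0) : dcaMeasure creneaux v < dcaMeasure creneaux T := by
  apply filter_length_lt (p := fun c => decide (0 < c) && (decide (c + 3600 ≤ v) || decide (v = 0)))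
    (q := fun c => decide (0 < c) && (decide (c + 3600 ≤ T) || decide (T = 0)))
  · intro c hc
    simp only [Bool.and_eq_true, Bool.or_eq_true, decide_eq_true_eq] at hc ⊢
    rcases hle with h | h
    · rcases hc.2 with h2 | h2
      · exact ⟨hc.1, Or.inl (by omega)⟩
      · omega
    · exact ⟨hc.1, Or.inr h⟩
  · exact hv
  · simp only [Bool.and_eq_true, Bool.or_eq_true, decide_eq_true_eq]
    exact ⟨h0, hle⟩
  · simp only [Bool.and_eq_false_iff]
    right
    simp only [Bool.or_eq_false_iff, decide_eq_false_iff_not]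
    omega

-- Q5: recursive greedy organisation (transliteration of A; creneaux[prochain] via pyGet?,
-- the index comes from enumerate so it is always in range)
def organisePassageRecursif (creneaux : List Int) (T : Int) : List Int :=
  -- 'if T == 0: T = max(creneaux) + 3600' inlined into the single use of T
  match h : dernierCreneauAvant
      (if T = 0 then (PySem.List.max? creneaux (fun x => x)).getD 0 + 3600 else T) creneaux with
  | none => []
  | some i =>
      let v := (PySem.List.pyGet? creneaux i).getD 0
      v :: organisePassageRecursif creneaux v
termination_by dcaMeasure creneaux T
decreasing_by
  obtain ⟨w, hw1, hw2, hw3, hw4⟩ := dca_some_facts _ _ _ h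
  simp only [hw1, Option.getD_some]
  apply dcaMeasure_lt creneaux T w hw4 hw2
  by_cases hT : T = 0
  · exact Or.inr hT
  · left; simpa [hT] using hw3

-- ===== PORT B =====

-- one sort, then a single greedy pass: pick c when 0 < c and c + 3600 <= limit
def organisePassageRecursif_alt (creneaux : List Int) (T : Int) : List Int :=
  let limit := if T = 0 then (PySem.List.max? creneaux (fun x => x)).getD 0 + 3600 else T
  ((PySem.List.sorted creneaux (fun x => x) true).foldl
    (fun (st : List Int × Int) c =>
      if 0 < c ∧ c + 3600 ≤ st.2 then (st.1 ++ [c], c) else st)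
    ([], limit)).1

-- ===== PRECONDITION & SPEC =====

-- Pre_ excludes only the empty list with T = 0, where Python's max([]) raises ValueError.
def Pre_organisePassageRecursif (creneaux : List Int) (T : Int) : Prop :=
  creneaux ≠ [] ∨ T ≠ 0
instance (creneaux : List Int) (T : Int) : Decidable (Pre_organisePassageRecursif creneaux T) := by
  unfold Pre_organisePassageRecursif; infer_instance

def pvWitness_organisePassageRecursif : List Int × Int := ([7200, 3600, 10000], 0)

def Spec_organisePassageRecursif (creneaux : List Int) (T : Int) (out : List Int) : Prop :=
  out = organisePassageRecursif_alt creneaux T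
instance (creneaux : List Int) (T : Int) (out : List Int) : Decidable (Spec_organisePassageRecursif creneaux T out) := by
  unfold Spec_organisePassageRecursif; infer_instance

-- ===== CLAIM (what is proved, stated in full; the proofs are below) =====
def Claim_equal_organisePassageRecursif : Prop := ∀ (creneaux : List Int) (T : Int), Dom_organisePassageRecursif creneaux T → Pre_organisePassageRecursif creneaux T → Spec_organisePassageRecursif creneaux T (organisePassageRecursif creneaux T)

-- ===== LEMMAS AND PROOFS =====

-- the greedy pass of B as a structural recursion
def greedy : List Int → Int → List Int
  | [], _ => []
  | c :: s, lim => if 0 < c ∧ c + 3600 ≤ lim then c :: greedy s c else greedy s lim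

theorem foldl_greedy (s : List Int) :
    ∀ (acc : List Int) (lim : Int),
      (s.foldl (fun (st : List Int × Int) c =>
        if 0 < c ∧ c + 3600 ≤ st.2 then (st.1 ++ [c], c) else st) (acc, lim)).1
      = acc ++ greedy s lim := by
  induction s with
  | nil => intro acc lim; simp [greedy]
  | cons c t ih =>
    intro acc lim
    simp only [List.foldl_cons, greedy]
    split_ifs with h
    · rw [ih]; simp
    · rw [ih]

theorem alt_eq_greedy (creneaux : List Int) (T : Int) :
    organisePassageRecursif_alt creneaux T
      = greedy (PySem.List.sorted creneaux (fun x => x) true)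
          (if T = 0 then (PySem.List.max? creneaux (fun x => x)).getD 0 + 3600 else T) := by
  unfold organisePassageRecursif_alt
  rw [foldl_greedy]
  simp

theorem greedy_nil_of_none (lim : Int) :
    ∀ (s : List Int), (∀ c ∈ s, ¬(0 < c ∧ c + 3600 ≤ lim)) → greedy s lim = [] := by
  intro s
  induction s with
  | nil => intro _; rfl
  | cons c t ih =>
    intro h
    simp only [greedy]
    rw [if_neg (h c List.mem_cons_self)]
    exact ih (fun d hd => h d (List.mem_cons_of_mem _ hd))

-- a descending sorted list: the first eligible element is the maximum eligible one,
-- and picking it leaves the same greedy run as restarting the pass with limit = v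
theorem greedy_step (v : Int) (h0 : 0 < v) :
    ∀ (s : List Int) (lim : Int), s.Pairwise (fun a b => b ≤ a) → v ∈ s →
      v + 3600 ≤ lim → (∀ c ∈ s, c + 3600 ≤ lim → c ≤ v) →
      greedy s lim = v :: greedy s v := by
  intro s
  induction s with
  | nil => intro lim _ hv; simp at hv
  | cons c t ih =>
    intro lim hpw hv hvle hmax
    have hpwt := (List.pairwise_cons.mp hpw).2
    have hct : ∀ b ∈ t, b ≤ c := (List.pairwise_cons.mp hpw).1
    by_cases hc : 0 < c ∧ c + 3600 ≤ lim
    · -- first element fires: it must equal v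
      have hcv : c = v := by
        have h1 : c ≤ v := hmax c List.mem_cons_self hc.2
        rcases List.mem_cons.mp hv with rfl | hvt
        · rfl
        · exact le_antisymm h1 (hct v hvt)
      subst hcv
      simp only [greedy, if_pos hc]
      rw [if_neg (by omega : ¬(0 < c ∧ c + 3600 ≤ c))]
    · -- first element does not fire under lim, nor under v (since c ≥ v)
      have hvt : v ∈ t := by
        rcases List.mem_cons.mp hv with rfl | hvt
        · exact absurd ⟨h0, hvle⟩ hc
        · exact hvt
      have hcv : v ≤ c := hct v hvt
      simp only [greedy, if_neg hc]
      rw [if_neg (by omega : ¬(0 < c ∧ c + 3600 ≤ v))]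
      exact ih lim hpwt hvt hvle (fun d hd => hmax d (List.mem_cons_of_mem _ hd))

-- state lemmas about the dernierCreneauAvant fold
theorem dca_fold_ge (T : Int) :
    ∀ (l : List (Int × Int)) (st : Option Int × Int), st.2 ≤ (l.foldl (dcaStep T) st).2 := by
  intro l
  induction l with
  | nil => intro st; simp
  | cons p t ih =>
    intro st
    simp only [List.foldl_cons]
    refine le_trans ?_ (ih _)
    unfold dcaStep
    split_ifs with h
    · exact le_of_lt h.1
    · exact le_refl _

theorem dca_fold_max (T : Int) :
    ∀ (l : List (Int × Int)) (st : Option Int × Int) (p : Int × Int), p ∈ l →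
      p.2 + 3600 ≤ T → p.2 ≤ (l.foldl (dcaStep T) st).2 := by
  intro l
  induction l with
  | nil => intro st p hp; simp at hp
  | cons q t ih =>
    intro st p hp hle
    rcases List.mem_cons.mp hp with rfl | hpt
    · simp only [List.foldl_cons]
      refine le_trans ?_ (dca_fold_ge T t _)
      unfold dcaStep
      split_ifs with h
      · exact le_refl _
      · rcases not_and_or.mp h with h1 | h1
        · exact not_lt.mp h1
        · exact absurd hle h1
    · exact ih _ p hpt hle

theorem dca_fold_some (T : Int) :
    ∀ (l : List (Int × Int)) (st : Option Int × Int) (i : Int), st.1 = some i →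
      ∃ j, (l.foldl (dcaStep T) st).1 = some j := by
  intro l
  induction l with
  | nil => intro st i h; exact ⟨i, h⟩
  | cons p t ih =>
    intro st i h
    simp only [List.foldl_cons]
    unfold dcaStep
    split_ifs with hc
    · exact ih _ p.1 rfl
    · exact ih _ i h

theorem dca_fold_none (T : Int) :
    ∀ (l : List (Int × Int)), ((l.foldl (dcaStep T) (none, 0)).1 = none) →
      ∀ p ∈ l, ¬(0 < p.2 ∧ p.2 + 3600 ≤ T) := by
  intro l
  induction l with
  | nil => intro _ p hp; simp at hp
  | cons q t ih =>
    intro h p hp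
    simp only [List.foldl_cons] at h
    by_cases hc : (0:Int) < q.2 ∧ q.2 + 3600 ≤ T
    · exfalso
      have hstep : dcaStep T (none, 0) q = (some q.1, q.2) := by
        unfold dcaStep; rw [if_pos ⟨hc.1, hc.2⟩]
      rw [hstep] at h
      obtain ⟨j, hj⟩ := dca_fold_some T t (some q.1, q.2) q.1 rfl
      rw [hj] at h; exact Option.some_ne_none j h
    · have hstep : dcaStep T (none, 0) q = (none, 0) := by
        unfold dcaStep
        rw [if_neg]
        simpa using hc
      rw [hstep] at h
      rcases List.mem_cons.mp hp with rfl | hpt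
      · exact hc
      · exact ih h p hpt

theorem dca_none_facts (T : Int) (creneaux : List Int)
    (h : dernierCreneauAvant T creneaux = none) :
    ∀ c ∈ creneaux, ¬(0 < c ∧ c + 3600 ≤ T) := by
  intro c hc
  unfold dernierCreneauAvant at h
  obtain ⟨k, hk, hck⟩ := List.getElem_of_mem hc
  have hmem : ((k : Int), c) ∈ PySem.List.enumerate creneaux 0 := by
    rw [PySem.List.mem_enumerate_iff]
    exact ⟨k, hk, by simp [hck]⟩
  exact dca_fold_none T _ h _ hmem

theorem dca_maximal (T : Int) (creneaux : List Int) (i : Int)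
    (h : dernierCreneauAvant T creneaux = some i) :
    ∀ c ∈ creneaux, c + 3600 ≤ T →
      c ≤ ((PySem.List.enumerate creneaux 0).foldl (dcaStep T) (none, 0)).2 := by
  intro c hc hle
  obtain ⟨k, hk, hck⟩ := List.getElem_of_mem hc
  have hmem : ((k : Int), c) ∈ PySem.List.enumerate creneaux 0 := by
    rw [PySem.List.mem_enumerate_iff]
    exact ⟨k, hk, by simp [hck]⟩
  exact dca_fold_max T _ _ _ hmem hle

-- value returned at the found index equals the fold's running maximum
theorem dca_value_eq (T : Int) (creneaux : List Int) (i : Int)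
    (h : dernierCreneauAvant T creneaux = some i) :
    PySem.List.pyGet? creneaux i
      = some ((PySem.List.enumerate creneaux 0).foldl (dcaStep T) (none, 0)).2 := by
  have hinv : dcaInv T creneaux ((PySem.List.enumerate creneaux 0).foldl (dcaStep T) (none, 0)) := by
    apply dcaInv_foldl
    · intro p hp
      rw [PySem.List.mem_enumerate_iff] at hp
      obtain ⟨k, hk, rfl⟩ := hp
      constructor
      · simp [PySem.List.pyGet?_natCast, List.getElem?_eq_getElem hk]
      · exact List.getElem_mem hk
    · exact ⟨le_refl 0, by intro i hi; simp at hi⟩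
  unfold dernierCreneauAvant at h
  exact (hinv.2 i h).1

-- main lemma: A equals the greedy pass on the descending-sorted list
theorem a_eq_greedy (creneaux : List Int) (T : Int) :
    organisePassageRecursif creneaux T
      = greedy (PySem.List.sorted creneaux (fun x => x) true)
          (if T = 0 then (PySem.List.max? creneaux (fun x => x)).getD 0 + 3600 else T) := by
  induction T using organisePassageRecursif.induct creneaux with
  | case1 x hnone =>
    simp only [dite_eq_ite] at hnone
    rw [organisePassageRecursif.eq_def]
    split
    next heq =>
      rw [greedy_nil_of_none]
      intro c hc
      exact dca_none_facts _ _ heq c ((PySem.List.mem_sorted _ _ _ _).mp hc)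
    next i heq =>
      rw [hnone] at heq
      cases heq
  | case2 x i hsome v ih =>
    simp only [dite_eq_ite] at hsome
    rw [organisePassageRecursif.eq_def]
    split
    next heq =>
      rw [hsome] at heq
      cases heq
    next i' heq =>
      rw [hsome] at heq
      injection heq with hii
      subst hii
      obtain ⟨w, hw1, hw2, hw3, hw4⟩ := dca_some_facts _ _ _ hsome
      simp only [v, hw1, Option.getD_some] at ih ⊢
      have hvpos : w ≠ 0 := by omega
      rw [ih, if_neg hvpos]
      have hmax := dca_maximal _ _ _ hsome
      have hval := dca_value_eq _ _ _ hsome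
      rw [hw1] at hval
      have hvfold : w = ((PySem.List.enumerate creneaux 0).foldl
          (dcaStep (if x = 0 then (PySem.List.max? creneaux (fun x => x)).getD 0 + 3600 else x))
          (none, 0)).2 := Option.some.inj hval
      have hpw : (PySem.List.sorted creneaux (fun x => x) true).Pairwise (fun a b => b ≤ a) :=
        (PySem.List.sorted_pairwise_rev creneaux (fun x => x)).imp (fun h => h)
      have hmem : w ∈ PySem.List.sorted creneaux (fun x => x) true :=
        (PySem.List.mem_sorted _ _ _ _).mpr hw4
      have hmaxs : ∀ c ∈ PySem.List.sorted creneaux (fun x => x) true,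
          c + 3600 ≤ (if x = 0 then (PySem.List.max? creneaux (fun x => x)).getD 0 + 3600 else x) →
          c ≤ w := by
        intro c hc hle
        rw [hvfold]
        exact hmax c ((PySem.List.mem_sorted _ _ _ _).mp hc) hle
      rw [greedy_step w hw2 _ _ hpw hmem hw3 hmaxs]

-- ===== VERDICT (by name: the statement is the Claim_ definition above) =====
theorem organisePassageRecursif_spec : Claim_equal_organisePassageRecursif := by
  intro creneaux T _ _
  unfold Spec_organisePassageRecursif
  rw [a_eq_greedy, alt_eq_greedy]
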